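-- pv_equiv track=rewrite | github.com/Kev-mi/helpfunctions | functions.py | polynomial_arithmetic_series_eval
-- ===== SOURCE A (Python) =====
-- def polynomial_arithmetic_series_eval(coeff_list, iterations):
--     sums = []
--     coeff_list.reverse()
--     for x in range(1, iterations+1):
--         total = 0
--         for power, coeff in enumerate(coeff_list):
--             total += (x ** power) * coeff
--         sums.append(total)
--     return sums
-- ===== SOURCE B (Python) =====
-- def polynomial_arithmetic_series_eval(coeff_list, iterations):
--     # Horner evaluation on the original (highest-power-first) order; no exponentiation.
--     # Note: unlike A, B does not reverse coeff_list in place.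
--     def horner(x):
--         acc = 0
--         for c in coeff_list:
--             acc = acc * x + c
--         return acc
--     return [horner(x) for x in range(1, iterations + 1)]
-- ===== Notes on version B (the rewrite author's own statement) =====
-- stated objective: alternative
-- what changed: Replaces the per-x enumerate/power-sum over the reversed list by Horner's rule on the original coefficient order, removing all exponentiations and the in-place reverse of the argument.
import Mathlib
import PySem

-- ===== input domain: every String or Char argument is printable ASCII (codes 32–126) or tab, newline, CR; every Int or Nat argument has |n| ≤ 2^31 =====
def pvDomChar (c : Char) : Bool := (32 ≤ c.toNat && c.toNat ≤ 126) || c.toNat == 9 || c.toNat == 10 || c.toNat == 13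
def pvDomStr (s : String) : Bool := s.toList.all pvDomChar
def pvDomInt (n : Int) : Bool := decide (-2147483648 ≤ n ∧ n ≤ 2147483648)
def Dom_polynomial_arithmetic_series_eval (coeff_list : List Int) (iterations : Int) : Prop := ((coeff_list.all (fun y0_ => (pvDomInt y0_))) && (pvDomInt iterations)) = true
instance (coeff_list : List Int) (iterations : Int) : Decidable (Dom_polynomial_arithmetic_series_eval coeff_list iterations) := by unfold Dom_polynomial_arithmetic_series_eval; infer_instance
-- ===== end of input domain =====

-- B replaces the power-sum over the reversed list by Horner's rule (no exponentiation).
-- Equivalence is about the RETURN value only: A reverses coeff_list in place, B does not mutate it.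

-- ===== PORT A =====
def polynomial_arithmetic_series_eval (coeff_list : List Int) (iterations : Int) : List Int :=
  let cl := coeff_list.reverse
  (PySem.List.pyRange 1 (iterations + 1) 1).foldl
    (fun sums x =>
      sums ++ [(PySem.List.enumerate cl 0).foldl
        -- x ** power with power = enumerate index ≥ 0: exact as x ^ power.toNat
        (fun total pc => total + x ^ pc.1.toNat * pc.2) 0])
    []

-- ===== PORT B =====
def pvHorner (coeff_list : List Int) (x : Int) : Int :=
  coeff_list.foldl (fun acc c => acc * x + c) 0

def polynomial_arithmetic_series_eval_alt (coeff_list : List Int) (iterations : Int) : List Int :=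
  (PySem.List.pyRange 1 (iterations + 1) 1).map (pvHorner coeff_list)

-- ===== PRECONDITION & SPEC =====
def Spec_polynomial_arithmetic_series_eval (coeff_list : List Int) (iterations : Int) (out : List Int) : Prop := out = polynomial_arithmetic_series_eval_alt coeff_list iterations
instance (coeff_list : List Int) (iterations : Int) (out : List Int) : Decidable (Spec_polynomial_arithmetic_series_eval coeff_list iterations out) := by unfold Spec_polynomial_arithmetic_series_eval; infer_instance

-- ===== CLAIM (what is proved, stated in full; the proofs are below) =====
def Claim_equal_polynomial_arithmetic_series_eval : Prop := ∀ (coeff_list : List Int) (iterations : Int), Dom_polynomial_arithmetic_series_eval coeff_list iterations → Spec_polynomial_arithmetic_series_eval coeff_list iterations (polynomial_arithmetic_series_eval coeff_list iterations)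

-- ===== LEMMAS AND PROOFS =====

-- Horner fold with a general accumulator.
theorem horner_acc (x : Int) (cs : List Int) (a : Int) :
    cs.foldl (fun acc c => acc * x + c) a
      = a * x ^ cs.length + cs.foldl (fun acc c => acc * x + c) 0 := by
  induction cs generalizing a with
  | nil => simp
  | cons c cs ih =>
    simp only [List.foldl_cons, List.length_cons]
    rw [ih (a * x + c), ih (0 * x + c)]
    ring

-- The inner enumerate-power sum over the reversed list equals Horner on the original list.
theorem enum_rev_eq_horner (x : Int) (cs : List Int) :
    (PySem.List.enumerate cs.reverse 0).foldl (fun total pc => total + x ^ pc.1.toNat * pc.2) 0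
      = pvHorner cs x := by
  induction cs with
  | nil => rfl
  | cons c cs ih =>
    have hrev : (c :: cs).reverse = cs.reverse ++ [c] := by simp
    rw [hrev, PySem.List.enumerate_append, List.foldl_append]
    have hone : PySem.List.enumerate [c] (0 + (cs.reverse.length : Int))
        = [((cs.length : Int), c)] := by
      simp [PySem.List.enumerate_cons, PySem.List.enumerate_nil]
    rw [hone]
    simp only [List.foldl_cons, List.foldl_nil, ih]
    unfold pvHorner
    rw [List.foldl_cons, horner_acc x cs (0 * x + c)]
    simp [Int.toNat_natCast]
    ring

-- ===== VERDICT (by name: the statement is the Claim_ definition above) =====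
theorem polynomial_arithmetic_series_eval_spec : Claim_equal_polynomial_arithmetic_series_eval := by
  intro coeff_list iterations _
  unfold Spec_polynomial_arithmetic_series_eval polynomial_arithmetic_series_eval
    polynomial_arithmetic_series_eval_alt
  rw [PySem.List.foldl_append_singleton_eq_map]
  simp only [List.nil_append]
  exact List.map_congr_left (fun x _ => enum_rev_eq_horner x coeff_list)
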